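-- pv_equiv track=rewrite | github.com/Yawn-Sean/Daily_CF_Problems | daily_problems/2025/04/0402/personal_submission/cf766c_liryc.py | solve2
-- ===== SOURCE A (Python) =====
-- pmax = lambda x, y: y if y > x else x
--
-- def solve2(n: int, s: str, a: list[int]) -> int:
--     i = 0
--     cn = [0] * 26
--     hp = []
--     ans = 0
--     for j, c in enumerate(s):
--         x = ord(c) - 97
--         cn[x] += 1
--         if cn[x] == 1:
--             heappush(hp, (a[x], x))
--         while j - i + 1 > hp[0][0]:
--             y = ord(s[i]) - 97
--             i += 1
--             cn[y] -= 1
--             while cn[hp[0][1]] == 0: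
--                 heappop(hp)
--         ans = pmax(ans, j - i + 1)
--     return ans
-- ===== SOURCE B (Python) =====
-- def solve2(n: int, s: str, a: list[int]) -> int:
--     # limits per position; invalid windows are exactly those longer than some position's limit
--     v = [a[ord(c) - 97] for c in s]
--
--     def ok(L: int) -> bool:
--         # is there a run of L consecutive positions with limit >= L ?
--         cnt = 0
--         for x in v:
--             cnt = cnt + 1 if x >= L else 0
--             if cnt >= L:
--                 return True
--         return L == 0
--
--     # achievable lengths are downward closed: binary search the largest
--     lo, hi = 0, len(s)
--     while lo < hi:
--         mid = (lo + hi + 1) // 2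
--         if ok(mid):
--             lo = mid
--         else:
--             hi = mid - 1
--     return lo
-- ===== Notes on version B (the rewrite author's own statement) =====
-- stated objective: alternative
-- what changed: Replaces A's sliding window with a lazily-cleaned min-heap of per-letter limits by a binary search on the answer L with a linear scan per candidate that looks for a run of L consecutive positions whose limit a[ord(c)-97] is >= L (achievable lengths are downward closed).
import Mathlib
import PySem

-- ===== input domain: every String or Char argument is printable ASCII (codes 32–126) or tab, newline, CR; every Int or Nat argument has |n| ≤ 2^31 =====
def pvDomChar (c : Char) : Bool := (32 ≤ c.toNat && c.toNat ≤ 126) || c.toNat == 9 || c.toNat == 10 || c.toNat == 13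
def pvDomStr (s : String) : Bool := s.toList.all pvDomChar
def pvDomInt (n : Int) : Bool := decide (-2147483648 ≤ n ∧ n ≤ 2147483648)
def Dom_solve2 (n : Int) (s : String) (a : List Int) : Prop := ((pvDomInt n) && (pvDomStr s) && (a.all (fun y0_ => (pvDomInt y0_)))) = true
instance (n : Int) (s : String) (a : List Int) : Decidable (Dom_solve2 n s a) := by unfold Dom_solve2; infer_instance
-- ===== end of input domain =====

-- B replaces A's sliding window + lazy min-heap by a binary search on the answer with a
-- linear run-length check per candidate (objective: alternative).

-- ===== PORT A =====
-- pmax = lambda x, y: y if y > x else x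
def pmaxI (x y : Int) : Int := if y > x then y else x

-- heapq is ported as a sorted-list priority queue (heappush = ordered insert by Python's
-- tuple order, heappop = drop the first element): solve2 observes hp only through hp[0]
-- and through the multiset of stored pairs, and on those observations a binary heap and a
-- sorted list agree exactly (the root of a heap is a minimal element, as is the head here).
def pqPush : List (Int × Int) → (Int × Int) → List (Int × Int)
  | [], e => [e]
  | f :: t, e =>
    if e.1 < f.1 ∨ (e.1 = f.1 ∧ e.2 ≤ f.2) then e :: f :: t else f :: pqPush t e

-- inner `while cn[hp[0][1]] == 0: heappop(hp)`; none = IndexError (hp empty or bad index)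
def pqClean (cn : List Int) : List (Int × Int) → Option (List (Int × Int))
  | [] => none
  | h :: t =>
    match PySem.List.pyGet? cn h.2 with
    | none => none
    | some c => if c = 0 then pqClean cn t else some (h :: t)

-- outer `while j - i + 1 > hp[0][0]` loop; `fuel` only makes the recursion structural
-- (each pass needs i < len(s), so len(s)+1 passes are never exceeded); none = IndexError
def shrinkA (sl : List Char) (j : Nat) :
    Nat → Nat → List Int → List (Int × Int) → Option (Nat × List Int × List (Int × Int))
  | 0, _, _, _ => none
  | _ + 1, _, _, [] => none
  | fuel + 1, i, cn, h :: t =>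
    if (j : Int) - (i : Int) + 1 > h.1 then
      match PySem.List.pyGet? sl (i : Int) with
      | none => none
      | some c =>
        let y : Int := (c.toNat : Int) - 97
        match PySem.List.pyGet? cn y with
        | none => none
        | some cy =>
          let cn' := PySem.List.pySetD cn y (cy - 1)
          match pqClean cn' (h :: t) with
          | none => none
          | some hp' => shrinkA sl j fuel (i + 1) cn' hp'
    else some (i, cn, h :: t)

-- the `for j, c in enumerate(s)` loop, state (i, cn, hp, ans); none = IndexError
def mainA (sl : List Char) (a : List Int) :
    Nat → Nat → List Int → List (Int × Int) → Int → List Char → Option Int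
  | _, _, _, _, ans, [] => some ans
  | j, i, cn, hp, ans, c :: rest =>
    let x : Int := (c.toNat : Int) - 97
    match PySem.List.pyGet? cn x with
    | none => none
    | some cx =>
      let cn' := PySem.List.pySetD cn x (cx + 1)
      match (if cx + 1 = 1 then (PySem.List.pyGet? a x).map (fun ax => pqPush hp (ax, x))
             else some hp) with
      | none => none
      | some hp1 =>
        match shrinkA sl j (sl.length + 1) i cn' hp1 with
        | none => none
        | some (i', cn2, hp2) =>
          mainA sl a (j + 1) i' cn2 hp2 (pmaxI ans ((j : Int) - (i' : Int) + 1)) rest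

def solve2 (_n : Int) (s : String) (a : List Int) : Int :=
  match mainA s.toList a 0 0 (List.replicate 26 (0 : Int)) [] 0 s.toList with
  | some v => v
  | none => 0      -- none = the Python raises (IndexError); excluded by Pre_solve2

-- ===== PORT B =====
-- the `for x in v` loop of ok(L), with its early return
def okGo (L : Int) : Int → List Int → Bool
  | _, [] => L == 0
  | cnt, x :: rest =>
    let cnt' : Int := if x ≥ L then cnt + 1 else 0
    if cnt' ≥ L then true else okGo L cnt' rest

def okB (v : List Int) (L : Int) : Bool := okGo L 0 v

-- the `while lo < hi` binary search; `fuel` only makes the recursion structural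
-- (hi - lo shrinks every pass, so len(s)+1 passes are never exceeded)
def bsearchB (v : List Int) : Nat → Int → Int → Int
  | 0, lo, _ => lo
  | fuel + 1, lo, hi =>
    if lo < hi then
      let mid := PySem.Int.floordiv (lo + hi + 1) 2
      if okB v mid then bsearchB v fuel mid hi else bsearchB v fuel lo (mid - 1)
    else lo

def solve2_alt (_n : Int) (s : String) (a : List Int) : Int :=
  let v := s.toList.map (fun c => PySem.List.pyGetD a ((c.toNat : Int) - 97) 0)
  bsearchB v (s.toList.length + 1) 0 (PySem.List.len v)

-- ===== PRECONDITION & SPEC =====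
-- Pre_ restricts to the task's natural domain: every character of s a lowercase letter
-- whose limit a[ord(c)-97] exists and is ≥ 1.  Outside it the Python A either raises
-- IndexError (index out of range, or the heap runs empty over a char with limit ≤ 0) or,
-- for characters 'G'..'`', returns a value produced by negative-index wraparound into cn/a.
def Pre_solve2 (n : Int) (s : String) (a : List Int) : Prop :=
  s.toList.all (fun c =>
    decide (97 ≤ c.toNat) && decide (c.toNat ≤ 122) &&
    decide (c.toNat - 97 < a.length) && decide (1 ≤ a.getD (c.toNat - 97) 0)) = true
instance (n : Int) (s : String) (a : List Int) : Decidable (Pre_solve2 n s a) := by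
  unfold Pre_solve2; infer_instance

def pvWitness_solve2 : Int × String × List Int := (3, "aab", [2, 3])

def Spec_solve2 (n : Int) (s : String) (a : List Int) (out : Int) : Prop := out = solve2_alt n s a
instance (n : Int) (s : String) (a : List Int) (out : Int) : Decidable (Spec_solve2 n s a out) := by
  unfold Spec_solve2; infer_instance

-- ===== CLAIM (what is proved, stated in full; the proofs are below) =====
def Claim_equal_solve2 : Prop :=
  ∀ (n : Int) (s : String) (a : List Int), Dom_solve2 n s a → Pre_solve2 n s a →
    Spec_solve2 n s a (solve2 n s a)

-- ===== LEMMAS AND PROOFS =====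

-- the letter slot 0..25 of a character and its limit
def slotC (c : Char) : Nat := c.toNat - 97
def valC (a : List Int) (c : Char) : Int := a.getD (slotC c) 0
def vOf (a : List Int) (t : List Char) : List Int := t.map (valC a)

-- one character of the natural domain
def PreC (a : List Int) (c : Char) : Prop :=
  97 ≤ c.toNat ∧ c.toNat ≤ 122 ∧ slotC c < a.length ∧ 1 ≤ valC a c

-- `v has a window of length L (at offset p) all of whose entries are ≥ L`
def Good (v : List Int) (L : Int) : Prop :=
  ∃ p : Nat, p + L.toNat ≤ v.length ∧ ∀ k : Nat, k < L.toNat → L ≤ v.getD (p + k) 0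

lemma good_zero (v : List Int) : Good v 0 := ⟨0, by simp, by simp⟩

lemma good_mono {v : List Int} {L L' : Int} (h : Good v L) (_h0 : 0 ≤ L') (hle : L' ≤ L) :
    Good v L' := by
  obtain ⟨p, hp, hv⟩ := h
  exact ⟨p, by omega, fun k hk => le_trans hle (hv k (by omega))⟩

lemma good_not_big {v : List Int} {L : Int} (h : (v.length : Int) < L) : ¬ Good v L := by
  rintro ⟨p, hp, -⟩; omega


lemma good_shift {x : Int} {rest : List Int} {L : Int} (h : Good rest L) : Good (x :: rest) L := by
  obtain ⟨p, hp, hv⟩ := h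
  refine ⟨p + 1, by simp; omega, fun k hk => ?_⟩
  have := hv k hk
  rw [show p + 1 + k = (p + k) + 1 by omega, List.getD_cons_succ]
  exact this

lemma good_of_run {v : List Int} {L : Int} {m : Nat} (hm : m ≤ v.length)
    (hrun : ∀ k : Nat, k < m → L ≤ v.getD k 0) (hLm : L ≤ (m : Int)) : Good v L :=
  ⟨0, by omega, fun k hk => by rw [Nat.zero_add]; exact hrun k (by omega)⟩

lemma okGo_iff (v : List Int) (L : Int) (hL : 1 ≤ L) :
    ∀ cnt : Int, 0 ≤ cnt → cnt < L →
    (okGo L cnt v = true ↔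
      ((∃ m : Nat, m ≤ v.length ∧ (∀ k : Nat, k < m → L ≤ v.getD k 0) ∧ L ≤ cnt + m) ∨ Good v L)) := by
  induction v with
  | nil =>
    intro cnt h0 hlt
    simp only [okGo, beq_iff_eq]
    constructor
    · intro h; omega
    · rintro (⟨m, hm, -, hcm⟩ | ⟨p, hp, -⟩)
      · simp at hm; omega
      · simp at hp; omega
  | cons x rest ih =>
    intro cnt h0 hlt
    simp only [okGo]
    by_cases hx : x ≥ L
    · rw [if_pos hx]
      by_cases hge : cnt + 1 ≥ L
      · rw [if_pos hge]
        constructor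
        · intro _
          left
          refine ⟨1, by simp, fun k hk => ?_, by omega⟩
          have : k = 0 := by omega
          subst this; simpa using hx
        · intro _; rfl
      · rw [if_neg hge, ih (cnt + 1) (by omega) (by omega)]
        constructor
        · rintro (⟨m, hm, hrun, hcm⟩ | hg)
          · left
            refine ⟨m + 1, by simp; omega, fun k hk => ?_, by omega⟩
            cases k with
            | zero => simpa using hx
            | succ k' => rw [List.getD_cons_succ]; exact hrun k' (by omega)
          · exact Or.inr (good_shift hg)
        · rintro (⟨m, hm, hrun, hcm⟩ | hg)
          · cases m with
            | zero => omega
            | succ m' =>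
              left
              refine ⟨m', by simp at hm; omega, fun k hk => ?_, by omega⟩
              have := hrun (k + 1) (by omega)
              rwa [List.getD_cons_succ] at this
          · obtain ⟨p, hp, hv⟩ := hg
            cases p with
            | zero =>
              left
              refine ⟨L.toNat - 1, by simp at hp; omega, fun k hk => ?_, by omega⟩
              have := hv (k + 1) (by omega)
              rwa [show 0 + (k + 1) = k + 1 by omega, List.getD_cons_succ] at this
            | succ p' =>
              right
              refine ⟨p', by simp at hp; omega, fun k hk => ?_⟩
              have := hv k hk
              rwa [show p' + 1 + k = (p' + k) + 1 by omega, List.getD_cons_succ] at this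
    · rw [if_neg hx, if_neg (by omega : ¬ (0 : Int) ≥ L), ih 0 le_rfl (by omega)]
      have hrest : ∀ hg : Good (x :: rest) L, Good rest L := by
        rintro ⟨p, hp, hv⟩
        cases p with
        | zero =>
          exfalso
          have := hv 0 (by omega)
          simp at this; omega
        | succ p' =>
          refine ⟨p', by simp at hp; omega, fun k hk => ?_⟩
          have := hv k hk
          rwa [show p' + 1 + k = (p' + k) + 1 by omega, List.getD_cons_succ] at this
      constructor
      · rintro (⟨m, hm, hrun, hcm⟩ | hg)
        · exact Or.inr (good_shift (good_of_run hm hrun (by omega)))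
        · exact Or.inr (good_shift hg)
      · rintro (⟨m, hm, hrun, hcm⟩ | hg)
        · exfalso
          have := hrun 0 (by omega)
          simp at this; omega
        · exact Or.inr (hrest hg)

lemma okB_iff (v : List Int) (L : Int) (hL : 1 ≤ L) : okB v L = true ↔ Good v L := by
  unfold okB
  rw [okGo_iff v L hL 0 le_rfl (by omega)]
  constructor
  · rintro (⟨m, hm, hrun, hcm⟩ | hg)
    · exact good_of_run hm hrun (by omega)
    · exact hg
  · exact Or.inr

lemma bsearch_spec (v : List Int) :
    ∀ (fuel : Nat) (lo hi : Int), 0 ≤ lo → lo ≤ hi → (hi - lo).toNat < fuel →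
      Good v lo → (∀ L, hi < L → ¬ Good v L) →
      Good v (bsearchB v fuel lo hi) ∧ ∀ L, bsearchB v fuel lo hi < L → ¬ Good v L := by
  intro fuel
  induction fuel with
  | zero => intro lo hi h0 hle hf; omega
  | succ fuel ih =>
    intro lo hi h0 hle hf hgood hbad
    by_cases hlt : lo < hi
    · have hb : lo + 1 ≤ PySem.Int.floordiv (lo + hi + 1) 2 ∧
          PySem.Int.floordiv (lo + hi + 1) 2 ≤ hi := by
        have h2 := PySem.Int.floordiv_two_mid_bounds (lo := lo + 1) (hi := hi) (by omega)
        rwa [show lo + 1 + hi = lo + hi + 1 by ring] at h2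
      simp only [bsearchB, if_pos hlt]
      by_cases hok : okB v (PySem.Int.floordiv (lo + hi + 1) 2) = true
      · rw [if_pos hok]
        exact ih _ hi (by omega) (by omega) (by omega)
          ((okB_iff v _ (by omega)).mp hok) hbad
      · rw [if_neg hok]
        refine ih lo _ h0 (by omega) (by omega) hgood ?_
        intro L hL hg
        by_cases hL' : hi < L
        · exact hbad L hL' hg
        · exact hok ((okB_iff v _ (by omega)).mpr (good_mono hg (by omega) (by omega)))
    · simp only [bsearchB, if_neg hlt]
      exact ⟨hgood, fun L hL => hbad L (by omega)⟩

lemma alt_spec (n : Int) (s : String) (a : List Int) (hpre : ∀ c ∈ s.toList, PreC a c) :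
    Good (vOf a s.toList) (solve2_alt n s a) ∧
      ∀ L, solve2_alt n s a < L → ¬ Good (vOf a s.toList) L := by
  have hv : s.toList.map (fun c => PySem.List.pyGetD a ((c.toNat : Int) - 97) 0) = vOf a s.toList := by
    unfold vOf
    apply List.map_congr_left
    intro c hc
    obtain ⟨h1, h2, h3, h4⟩ := hpre c hc
    rw [show ((c.toNat : Int) - 97) = ((c.toNat - 97 : Nat) : Int) by omega,
      PySem.List.pyGetD_natCast]
    rfl
  have hlen : (vOf a s.toList).length = s.toList.length := by simp [vOf]
  simp only [solve2_alt, hv, PySem.List.len_eq, hlen]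
  exact bsearch_spec (vOf a s.toList) (s.toList.length + 1) 0 (s.toList.length) le_rfl
    (by omega) (by omega) (good_zero _) (fun L hL => good_not_big (by omega))


-- ---- A-side invariants ----

-- the heap-related state invariant: cn holds the per-slot counts of the window W,
-- hp is sorted by limit, every entry names a character of `done` with its limit,
-- every window character has an entry, and the head entry is live (its slot occurs in W)
def HOK (a : List Int) (done W : List Char) (cn : List Int) (hp : List (Int × Int)) : Prop :=
  cn.length = 26 ∧
  (∀ x : Nat, x < 26 → cn.getD x 0 = (W.countP (fun c => slotC c == x) : Int)) ∧
  hp.Pairwise (fun e f => e.1 ≤ f.1) ∧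
  (∀ e ∈ hp, ∃ c ∈ done, e.2 = ((slotC c : Nat) : Int) ∧ e.1 = valC a c) ∧
  (∀ c ∈ W, ∃ e ∈ hp, e.2 = ((slotC c : Nat) : Int)) ∧
  (∀ h hs, hp = h :: hs → ∃ c ∈ W, h.2 = ((slotC c : Nat) : Int))

-- the window done[i:] is valid (no longer than any of its limits)
def ValidInv (a : List Int) (done : List Char) (i : Nat) : Prop :=
  ∀ c ∈ done.drop i, ((done.length : Int) - i) ≤ valC a c

-- every longer window ending here is invalid
def MaxInv (a : List Int) (done : List Char) (i : Nat) : Prop :=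
  ∀ i' : Nat, i' < i → ∃ c ∈ done.drop i', ((done.length : Int) - i') > valC a c

-- the running answer is exactly the best over all windows inside `done`
def AInv (a : List Int) (done : List Char) (ans : Int) : Prop :=
  0 ≤ ans ∧ Good (vOf a done) ans ∧ ∀ L, ans < L → ¬ Good (vOf a done) L

lemma getD_set_eq_if {l : List Int} {sIdx x : Nat} {v : Int} (hx : x < l.length) :
    (l.set sIdx v).getD x 0 = if x = sIdx then v else l.getD x 0 := by
  rw [List.getD_eq_getElem _ _ (by simpa using hx), List.getElem_set]
  split <;> [skip; rw [List.getD_eq_getElem _ _ hx]] <;> simp_all [eq_comm]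

lemma pyGet?_getD {l : List Int} {i : Nat} (h : i < l.length) :
    PySem.List.pyGet? l (i : Int) = some (l.getD i 0) := by
  simp [PySem.List.pyGet?_natCast, List.getElem?_eq_getElem h]

lemma mem_pqPush {hp : List (Int × Int)} {e f : Int × Int} :
    f ∈ pqPush hp e ↔ f ∈ hp ∨ f = e := by
  induction hp with
  | nil => simp [pqPush]
  | cons g t ih =>
    simp only [pqPush]
    split
    · simp [or_comm]
    · simp [ih, or_assoc]

lemma pairwise_pqPush {hp : List (Int × Int)} {e : Int × Int}
    (h : hp.Pairwise (fun e f => e.1 ≤ f.1)) :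
    (pqPush hp e).Pairwise (fun e f => e.1 ≤ f.1) := by
  induction hp with
  | nil => simp [pqPush]
  | cons g t ih =>
    have h1 := (List.pairwise_cons.mp h).1
    have h2 := (List.pairwise_cons.mp h).2
    simp only [pqPush]
    split
    · rename_i hle
      have heg : e.1 ≤ g.1 := by rcases hle with hx | ⟨hx, -⟩ <;> omega
      refine List.pairwise_cons.mpr ⟨?_, h⟩
      intro f hf
      rcases List.mem_cons.mp hf with hf | hf
      · subst hf; exact heg
      · exact le_trans heg (h1 f hf)
    · rename_i hgt
      have hge : g.1 ≤ e.1 := by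
        have : ¬ e.1 < g.1 := fun hx => hgt (Or.inl hx)
        omega
      refine List.pairwise_cons.mpr ⟨?_, ih h2⟩
      intro f hf
      rcases mem_pqPush.mp hf with hf | hf
      · exact h1 f hf
      · subst hf; exact hge

lemma head_pqPush {hp : List (Int × Int)} {e h : Int × Int} {hs : List (Int × Int)}
    (heq : pqPush hp e = h :: hs) : h = e ∨ ∃ t, hp = h :: t := by
  cases hp with
  | nil => simp [pqPush] at heq; exact Or.inl heq.1.symm
  | cons g t =>
    simp only [pqPush] at heq
    split at heq
    · exact Or.inl (by injection heq with h1; exact h1.symm)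
    · injection heq with h1; exact Or.inr ⟨t, by rw [h1]⟩

lemma pqClean_spec (a : List Int) (done W : List Char) (cn : List Int)
    (hpre : ∀ c ∈ done, PreC a c)
    (hlen : cn.length = 26)
    (hcnt : ∀ x : Nat, x < 26 → cn.getD x 0 = (W.countP (fun c => slotC c == x) : Int)) :
    ∀ hp : List (Int × Int),
      hp.Pairwise (fun e f => e.1 ≤ f.1) →
      (∀ e ∈ hp, ∃ c ∈ done, e.2 = ((slotC c : Nat) : Int) ∧ e.1 = valC a c) →
      (∀ c ∈ W, ∃ e ∈ hp, e.2 = ((slotC c : Nat) : Int)) →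
      W ≠ [] →
      ∃ hp', pqClean cn hp = some hp' ∧ HOK a done W cn hp' ∧ ∀ f ∈ hp', f ∈ hp := by
  intro hp
  induction hp with
  | nil =>
    intro _ _ hwit hW
    obtain ⟨c, hc⟩ := List.exists_mem_of_ne_nil W hW
    obtain ⟨e, he, -⟩ := hwit c hc
    simp at he
  | cons h t ih =>
    intro hpw hmem hwit hW
    obtain ⟨c1, hc1, he2, he1⟩ := hmem h (by simp)
    obtain ⟨-, -, hsl, -⟩ := hpre c1 hc1
    have hs26 : slotC c1 < 26 := by
      have := (hpre c1 hc1).2.1; unfold slotC; omega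
    have hget : PySem.List.pyGet? cn h.2 = some (cn.getD (slotC c1) 0) := by
      rw [he2]; exact pyGet?_getD (by omega)
    simp only [pqClean, hget]
    by_cases hz : cn.getD (slotC c1) 0 = 0
    · rw [if_pos hz]
      have hnotin : ∀ c ∈ W, slotC c ≠ slotC c1 := by
        intro c hc hEq
        have := hcnt (slotC c1) hs26
        rw [hz] at this
        have hpos : 0 < W.countP (fun c => slotC c == slotC c1) :=
          List.countP_pos_iff.mpr ⟨c, hc, by simp [hEq]⟩
        omega
      have hwit' : ∀ c ∈ W, ∃ e ∈ t, e.2 = ((slotC c : Nat) : Int) := by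
        intro c hc
        obtain ⟨e, he, hee⟩ := hwit c hc
        rcases List.mem_cons.mp he with he | he
        · exfalso
          apply hnotin c hc
          have : ((slotC c : Nat) : Int) = ((slotC c1 : Nat) : Int) := by rw [← hee, he, he2]
          omega
        · exact ⟨e, he, hee⟩
      obtain ⟨hp', ha, hb, hc⟩ :=
        ih (List.pairwise_cons.mp hpw).2 (fun e he => hmem e (by simp [he])) hwit' hW
      exact ⟨hp', ha, hb, fun f hf => by simp [hc f hf]⟩
    · rw [if_neg hz]
      refine ⟨h :: t, rfl, ⟨hlen, hcnt, hpw, hmem, hwit, ?_⟩, fun f hf => hf⟩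
      intro h' hs' heq
      injection heq with heq1 heq2
      subst heq1
      have := hcnt (slotC c1) hs26
      have hpos : 0 < W.countP (fun c => slotC c == slotC c1) := by omega
      obtain ⟨c, hc, hcc⟩ := List.countP_pos_iff.mp hpos
      exact ⟨c, hc, by rw [he2]; simp at hcc; rw [hcc]⟩


lemma valC_eq_of_slot {a : List Int} {c c' : Char} (h : slotC c = slotC c') :
    valC a c = valC a c' := by unfold valC; rw [h]

lemma pyGet?_getD_char {l : List Char} {i : Nat} (h : i < l.length) :
    PySem.List.pyGet? l (i : Int) = some l[i] := by
  simp [PySem.List.pyGet?_natCast, List.getElem?_eq_getElem h]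

lemma shrink_spec (a : List Int) (t done1 rest' : List Char) (j : Nat)
    (ht : t = done1 ++ rest') (hpre : ∀ c ∈ t, PreC a c) (hj : done1.length = j + 1) :
    ∀ (fuel i : Nat) (cn : List Int) (hp : List (Int × Int)),
      i ≤ j → j - i < fuel →
      HOK a done1 (done1.drop i) cn hp → MaxInv a done1 i →
      ∃ i₂ cn₂ hp₂, shrinkA t j fuel i cn hp = some (i₂, cn₂, hp₂) ∧
        i ≤ i₂ ∧ i₂ ≤ j ∧
        HOK a done1 (done1.drop i₂) cn₂ hp₂ ∧ ValidInv a done1 i₂ ∧ MaxInv a done1 i₂ := by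
  subst ht
  intro fuel
  induction fuel with
  | zero => intro i cn hp hi hf; omega
  | succ fuel ih =>
    intro i cn hp hi hf hH hM
    obtain ⟨hlen, hcnt, hpw, hmem, hwit, hhead⟩ := hH
    have hpred : ∀ c ∈ done1, PreC a c := fun c hc => hpre c (List.mem_append_left _ hc)
    have hWne : done1.drop i ≠ [] := by
      have : (done1.drop i).length = done1.length - i := List.length_drop ..
      intro hnil; rw [hnil] at this; simp at this; omega
    cases hp with
    | nil =>
      obtain ⟨c, hc⟩ := List.exists_mem_of_ne_nil _ hWne
      obtain ⟨e, he, -⟩ := hwit c hc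
      simp at he
    | cons h hs =>
      obtain ⟨c0, hc0, hh2⟩ := hhead h hs rfl
      obtain ⟨c1, hc1, he2, he1⟩ := hmem h (by simp)
      have hh1 : h.1 = valC a c0 := by
        rw [he1]
        refine valC_eq_of_slot ?_
        have : ((slotC c1 : Nat) : Int) = ((slotC c0 : Nat) : Int) := by rw [← he2, hh2]
        omega
      have hc0t : c0 ∈ done1 := List.mem_of_mem_drop hc0
      have hv1 : 1 ≤ valC a c0 := (hpred c0 hc0t).2.2.2
      by_cases hcond : (j : Int) - (i : Int) + 1 > h.1
      · have hij : i < j := by omega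
        have hit : i < (done1 ++ rest').length := by
          rw [List.length_append]; omega
        have hi1 : i < done1.length := by omega
        have hgetc : PySem.List.pyGet? (done1 ++ rest') (i : Int) = some done1[i] := by
          rw [pyGet?_getD_char hit]
          exact congrArg some (List.getElem_append_left hi1)
        set ci := done1[i] with hci
        have hcimem : ci ∈ done1 := List.getElem_mem hi1
        obtain ⟨h97, h122, hslen, hval1⟩ := hpred ci hcimem
        have hs26 : slotC ci < 26 := by unfold slotC; omega
        have hycast : (ci.toNat : Int) - 97 = ((slotC ci : Nat) : Int) := by
          unfold slotC; omega
        have hgetcn : PySem.List.pyGet? cn ((ci.toNat : Int) - 97) =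
            some (cn.getD (slotC ci) 0) := by
          rw [hycast]; exact pyGet?_getD (by omega)
        have hWcons : done1.drop i = ci :: done1.drop (i + 1) := List.drop_eq_getElem_cons hi1
        have hsetD : PySem.List.pySetD cn ((ci.toNat : Int) - 97) (cn.getD (slotC ci) 0 - 1) =
            cn.set (slotC ci) (cn.getD (slotC ci) 0 - 1) := by
          rw [hycast, PySem.List.pySetD_natCast]
        have hcnt' : ∀ x : Nat, x < 26 →
            (cn.set (slotC ci) (cn.getD (slotC ci) 0 - 1)).getD x 0 =
              (((done1.drop (i + 1)).countP (fun c => slotC c == x) : Nat) : Int) := by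
          intro x hx
          rw [getD_set_eq_if (by omega)]
          have hcW := hcnt x hx
          rw [hWcons, List.countP_cons] at hcW
          by_cases hxe : x = slotC ci
          · rw [if_pos hxe]
            subst hxe
            simp at hcW
            rw [List.getD_eq_getElem?_getD]
            omega
          · rw [if_neg hxe]
            have hne : (slotC ci == x) = false := by simp; omega
            simp [hne] at hcW
            exact hcW
        have hW1ne : done1.drop (i + 1) ≠ [] := by
          have : (done1.drop (i + 1)).length = done1.length - (i + 1) := List.length_drop ..
          intro hnil; rw [hnil] at this; simp at this; omega
        have hwit' : ∀ c ∈ done1.drop (i + 1), ∃ e ∈ h :: hs, e.2 = ((slotC c : Nat) : Int) := by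
          intro c hc
          exact hwit c (by rw [hWcons]; exact List.mem_cons_of_mem _ hc)
        obtain ⟨hp', hclean, hHOK', hsub⟩ :=
          pqClean_spec a done1 (done1.drop (i + 1)) _ hpred
            (by rw [List.length_set]; exact hlen) hcnt' (h :: hs) hpw hmem hwit' hW1ne
        have hM' : MaxInv a done1 (i + 1) := by
          intro i' hi'
          by_cases hii : i' < i
          · exact hM i' hii
          · have : i' = i := by omega
            subst this
            exact ⟨c0, hc0, by rw [hh1] at hcond; omega⟩
        obtain ⟨i₂, cn₂, hp₂, hrec, hle2, hle3, hH2, hV2, hM2⟩ :=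
          ih (i + 1) _ hp' (by omega) (by omega) hHOK' hM'
        refine ⟨i₂, cn₂, hp₂, ?_, by omega, hle3, hH2, hV2, hM2⟩
        simp only [shrinkA, if_pos hcond, hgetc, hgetcn, hsetD, hclean]
        exact hrec
      · refine ⟨i, cn, h :: hs, ?_, le_rfl, hi, ⟨hlen, hcnt, hpw, hmem, hwit, hhead⟩, ?_, hM⟩
        · simp only [shrinkA, if_neg hcond]
        · intro c hc
          obtain ⟨e, he, hee⟩ := hwit c hc
          obtain ⟨c1', hc1', he2', he1'⟩ := hmem e he
          have hev : e.1 = valC a c := by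
            rw [he1']
            refine valC_eq_of_slot ?_
            have : ((slotC c1' : Nat) : Int) = ((slotC c : Nat) : Int) := by rw [← he2', hee]
            omega
          have hhe : h.1 ≤ e.1 := by
            rcases List.mem_cons.mp he with he' | he'
            · rw [he']
            · exact (List.pairwise_cons.mp hpw).1 e he'
          rw [← hev]
          omega


lemma vOf_append (a : List Int) (d : List Char) (c : Char) :
    vOf a (d ++ [c]) = vOf a d ++ [valC a c] := by simp [vOf]

lemma vOf_length (a : List Int) (l : List Char) : (vOf a l).length = l.length := by simp [vOf]

lemma vOf_getD {a : List Int} {l : List Char} {m : Nat} (h : m < l.length) :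
    (vOf a l).getD m 0 = valC a l[m] := by
  rw [List.getD_eq_getElem _ _ (by simpa [vOf] using h)]
  simp [vOf]

lemma good_prefix {v w : List Int} {L : Int} (h : Good v L) : Good (v ++ w) L := by
  obtain ⟨p, hp, hv⟩ := h
  refine ⟨p, by simp; omega, fun k hk => ?_⟩
  rw [List.getD_append _ _ _ _ (by omega)]
  exact hv k hk

lemma ans_update (a : List Int) (done : List Char) (c : Char) (i₂ : Nat) (ans : Int)
    (hi : i₂ ≤ done.length)
    (hval : ValidInv a (done ++ [c]) i₂) (hmax : MaxInv a (done ++ [c]) i₂)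
    (hA : AInv a done ans) :
    AInv a (done ++ [c]) (pmaxI ans ((done.length : Int) - (i₂ : Int) + 1)) := by
  obtain ⟨h0, hg, hmx⟩ := hA
  have hlen1 : (done ++ [c]).length = done.length + 1 := by simp
  have hgood2 : Good (vOf a (done ++ [c])) ((done.length : Int) - (i₂ : Int) + 1) := by
    refine ⟨i₂, ?_, ?_⟩
    · rw [vOf_length, hlen1]; omega
    · intro k hk
      have hklt : i₂ + k < done.length + 1 := by omega
      rw [vOf_getD (by omega)]
      have hmem : (done ++ [c])[i₂ + k] ∈ (done ++ [c]).drop i₂ := by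
        have hdl : k < ((done ++ [c]).drop i₂).length := by simp; omega
        have : ((done ++ [c]).drop i₂)[k] = (done ++ [c])[i₂ + k] := List.getElem_drop
        rw [← this]
        exact List.getElem_mem hdl
      have hv := hval _ hmem
      have hLL : ((done ++ [c]).length : Int) = (done.length : Int) + 1 := by simp
      omega
  refine ⟨by unfold pmaxI; split <;> omega, ?_, ?_⟩
  · unfold pmaxI
    split
    · exact hgood2
    · rw [vOf_append]; exact good_prefix hg
  · intro L hL hgl
    have hpm : ans < L ∧ (done.length : Int) - (i₂ : Int) + 1 < L := by
      unfold pmaxI at hL; split at hL <;> omega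
    have hL1 : 1 ≤ L := by omega
    obtain ⟨p, hp, hv⟩ := hgl
    rw [vOf_length, hlen1] at hp
    by_cases hcase : p + L.toNat ≤ done.length
    · apply hmx L hpm.1
      refine ⟨p, by rw [vOf_length]; omega, fun k hk => ?_⟩
      have hvk := hv k hk
      rw [vOf_append, List.getD_append _ _ _ _ (by rw [vOf_length]; omega)] at hvk
      exact hvk
    · have hpi : p < i₂ := by omega
      obtain ⟨c', hc', hgt⟩ := hmax p hpi
      obtain ⟨k', hk', hck⟩ := List.mem_iff_getElem.mp hc'
      have hk'' : k' < L.toNat := by simp at hk'; omega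
      have hvk := hv k' hk''
      have hidx : ((done ++ [c]).drop p)[k'] = (done ++ [c])[p + k'] := List.getElem_drop
      rw [vOf_getD (by simp at hk' ⊢; omega), ← hidx, hck] at hvk
      rw [hlen1] at hgt
      omega

lemma maxinv_snoc {a : List Int} {done : List Char} {c : Char} {i : Nat}
    (hM : MaxInv a done i) : MaxInv a (done ++ [c]) i := by
  intro i' hi'
  obtain ⟨c', hc', hgt⟩ := hM i' hi'
  have hi'' : i' ≤ done.length := by
    by_contra hcon
    rw [List.drop_eq_nil_of_le (by omega)] at hc'
    simp at hc'
  refine ⟨c', ?_, ?_⟩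
  · rw [List.drop_append_of_le_length hi'']
    exact List.mem_append_left _ hc'
  · rw [List.length_append]
    push_cast at hgt ⊢
    omega

lemma mainA_spec (a : List Int) (t : List Char) (hpre : ∀ c ∈ t, PreC a c) :
    ∀ (rest done : List Char) (i : Nat) (cn : List Int) (hp : List (Int × Int)) (ans : Int),
      t = done ++ rest → i ≤ done.length →
      HOK a done (done.drop i) cn hp → MaxInv a done i →
      AInv a done ans →
      ∃ r, mainA t a done.length i cn hp ans rest = some r ∧ AInv a t r := by
  intro rest
  induction rest with
  | nil =>
    intro done i cn hp ans ht hi hH hM hA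
    refine ⟨ans, rfl, ?_⟩
    rw [ht, List.append_nil]
    exact hA
  | cons c rest' ih =>
    intro done i cn hp ans ht hi hH hM hA
    obtain ⟨hlen, hcnt, hpw, hmem, hwit, hhead⟩ := hH
    have hct : c ∈ t := ht ▸ List.mem_append_right _ (by simp)
    obtain ⟨h97, h122, hslen, hval1⟩ := hpre c hct
    have hs26 : slotC c < 26 := by unfold slotC; omega
    have hxcast : (c.toNat : Int) - 97 = ((slotC c : Nat) : Int) := by unfold slotC; omega
    have hgetcn : PySem.List.pyGet? cn (((slotC c : Nat) : Int)) = some (cn.getD (slotC c) 0) :=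
      pyGet?_getD (by omega)
    have hW1 : (done ++ [c]).drop i = done.drop i ++ [c] := List.drop_append_of_le_length hi
    have hcnt1 : ∀ x : Nat, x < 26 →
        (cn.set (slotC c) (cn.getD (slotC c) 0 + 1)).getD x 0 =
          ((((done ++ [c]).drop i).countP (fun c' => slotC c' == x) : Nat) : Int) := by
      intro x hx
      rw [getD_set_eq_if (by omega), hW1, List.countP_append]
      have hcW := hcnt x hx
      by_cases hxe : x = slotC c
      · rw [if_pos hxe]; subst hxe
        simp
        rw [List.getD_eq_getElem?_getD] at hcW
        omega
      · rw [if_neg hxe]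
        have hne : (slotC c == x) = false := by simp; omega
        simp [hne]
        exact hcW
    have hMax1 : MaxInv a (done ++ [c]) i := maxinv_snoc hM
    have hmem1 : ∀ e ∈ hp, ∃ c' ∈ done ++ [c], e.2 = ((slotC c' : Nat) : Int) ∧ e.1 = valC a c' := by
      intro e he
      obtain ⟨c', hc', h1, h2⟩ := hmem e he
      exact ⟨c', List.mem_append_left _ hc', h1, h2⟩
    -- common continuation: whatever heap hp1 the push step produced, shrink then recurse
    have hcont : ∀ hp1 : List (Int × Int),
        hp1.Pairwise (fun e f => e.1 ≤ f.1) →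
        (∀ e ∈ hp1, ∃ c' ∈ done ++ [c], e.2 = ((slotC c' : Nat) : Int) ∧ e.1 = valC a c') →
        (∀ c' ∈ (done ++ [c]).drop i, ∃ e ∈ hp1, e.2 = ((slotC c' : Nat) : Int)) →
        (∀ h hs, hp1 = h :: hs → ∃ c' ∈ (done ++ [c]).drop i, h.2 = ((slotC c' : Nat) : Int)) →
        ∃ r, (match shrinkA t done.length (t.length + 1) i
                (cn.set (slotC c) (cn.getD (slotC c) 0 + 1)) hp1 with
              | none => none
              | some (i', cn2, hp2) =>
                mainA t a (done.length + 1) i' cn2 hp2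
                  (pmaxI ans ((done.length : Int) - (i' : Int) + 1)) rest') = some r ∧
          AInv a t r := by
      intro hp1 hp1pw hp1mem hp1wit hp1head
      have ht' : t = (done ++ [c]) ++ rest' := by rw [ht]; simp
      obtain ⟨i₂, cn₂, hp₂, hshr, hi2a, hi2b, hH2, hV2, hM2⟩ :=
        shrink_spec a t (done ++ [c]) rest' done.length ht' hpre (by simp)
          (t.length + 1) i _ hp1 hi
          (by rw [ht, List.length_append]; simp; omega)
          ⟨by rw [List.length_set]; exact hlen, hcnt1, hp1pw, hp1mem, hp1wit, hp1head⟩ hMax1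
      rw [hshr]
      have hA1 := ans_update a done c i₂ ans hi2b hV2 hM2 hA
      obtain ⟨r, hr, hAr⟩ := ih (done ++ [c]) i₂ cn₂ hp₂ _ ht' (by simp; omega) hH2 hM2 hA1
      rw [show (done ++ [c]).length = done.length + 1 by simp] at hr
      exact ⟨r, hr, hAr⟩
    by_cases hpush : cn.getD (slotC c) 0 + 1 = 1
    · have hgeta : PySem.List.pyGet? a (((slotC c : Nat) : Int)) = some (valC a c) :=
      pyGet?_getD hslen
      obtain ⟨r, hr, hAr⟩ :=
        hcont (pqPush hp (valC a c, ((slotC c : Nat) : Int)))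
          (pairwise_pqPush hpw)
          (by
            intro f hf
            rcases mem_pqPush.mp hf with hf | hf
            · exact hmem1 f hf
            · exact ⟨c, List.mem_append_right _ (by simp), by rw [hf], by rw [hf]⟩)
          (by
            intro c' hc'
            rw [hW1] at hc'
            rcases List.mem_append.mp hc' with hc' | hc'
            · obtain ⟨e, he, hee⟩ := hwit c' hc'
              exact ⟨e, mem_pqPush.mpr (Or.inl he), hee⟩
            · have : c' = c := by simpa using hc'
              subst this
              exact ⟨_, mem_pqPush.mpr (Or.inr rfl), rfl⟩)
          (by
            intro h hs heq
            rcases head_pqPush heq with he | ⟨t', ht''⟩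
            · exact ⟨c, by rw [hW1]; exact List.mem_append_right _ (by simp), by rw [he]⟩
            · obtain ⟨c0, hc0, hh⟩ := hhead h t' ht''
              exact ⟨c0, by rw [hW1]; exact List.mem_append_left _ hc0, hh⟩)
      refine ⟨r, ?_, hAr⟩
      simp only [mainA, hxcast, hgetcn, if_pos hpush, hgeta, Option.map_some,
        PySem.List.pySetD_natCast]
      exact hr
    · have hcpos : 0 < (done.drop i).countP (fun c' => slotC c' == slotC c) := by
        have := hcnt (slotC c) hs26
        omega
      obtain ⟨c0, hc0, hbeq⟩ := List.countP_pos_iff.mp hcpos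
      obtain ⟨r, hr, hAr⟩ :=
        hcont hp hpw hmem1
          (by
            intro c' hc'
            rw [hW1] at hc'
            rcases List.mem_append.mp hc' with hc' | hc'
            · exact hwit c' hc'
            · have : c' = c := by simpa using hc'
              subst this
              obtain ⟨e, he, hee⟩ := hwit c0 hc0
              refine ⟨e, he, ?_⟩
              rw [hee]
              simp at hbeq
              rw [hbeq])
          (by
            intro h hs heq
            obtain ⟨c0', hc0', hh⟩ := hhead h hs heq
            exact ⟨c0', by rw [hW1]; exact List.mem_append_left _ hc0', hh⟩)
      refine ⟨r, ?_, hAr⟩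
      simp only [mainA, hxcast, hgetcn, if_neg hpush, PySem.List.pySetD_natCast]
      exact hr

theorem solve2_spec : Claim_equal_solve2 := by
  intro n s a hdom hpre
  unfold Spec_solve2
  have hpre' : ∀ c ∈ s.toList, PreC a c := by
    intro c hc
    unfold Pre_solve2 at hpre
    have h := List.all_eq_true.mp hpre c hc
    simp only [Bool.and_eq_true, decide_eq_true_eq] at h
    exact ⟨h.1.1.1, h.1.1.2, h.1.2, h.2⟩
  have hH0 : HOK a [] [] (List.replicate 26 (0 : Int)) [] := by
    refine ⟨by simp, fun x hx => ?_, by simp, by simp, by simp, fun h hs heq => by simp at heq⟩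
    rw [List.getD_eq_getElem _ _ (by simpa using hx), List.getElem_replicate]
    simp
  have hA0 : AInv a [] 0 := by
    refine ⟨le_rfl, good_zero _, fun L hL => ?_⟩
    rintro ⟨p, hp, -⟩
    simp [vOf] at hp
    omega
  obtain ⟨r, hr, hAr⟩ := mainA_spec a s.toList hpre' s.toList [] 0 _ [] 0 rfl (by simp)
    hH0 (fun i' hi' => absurd hi' (by omega)) hA0
  have hsolve : solve2 n s a = r := by
    unfold solve2
    rw [show ([] : List Char).length = 0 from rfl] at hr
    rw [hr]
  have hB := alt_spec n s a hpre'
  obtain ⟨h0r, hgr, hmr⟩ := hAr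
  rw [hsolve]
  by_contra hne
  rcases lt_or_gt_of_ne hne with hlt | hgt
  · exact hmr _ hlt hB.1
  · exact hB.2 _ hgt hgr
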